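-- pv_equiv track=rewrite | github.com/SailfinIO/sailfin | scripts/migrate_colon_annotations.py | _find_string_regions
-- ===== SOURCE A (Python) =====
-- def _find_string_regions(line: str, comment_start: int) -> list:
--     """Return list of (start, end) index pairs for string literal regions."""
--     regions = []
--     in_string = False
--     escape = False
--     start = 0
--     i = 0
--     while i < comment_start:
--         ch = line[i]
--         if escape:
--             escape = False
--             i += 1
--             continue
--         if ch == '\\' and in_string:
--             escape = True
--             i += 1
--             continue
--         if ch == '"':
--             if in_string:
--                 regions.append((start, i + 1))
--                 in_string = False
--             else:
--                 in_string = True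
--                 start = i
--         i += 1
--     return regions
-- ===== SOURCE B (Python) =====
-- import re
--
-- _STRING_RE = re.compile(r'"(?:\\.|[^"\\])*"', re.DOTALL)
--
--
-- def _find_string_regions(line: str, comment_start: int) -> list:
--     """Return list of (start, end) index pairs for string literal regions."""
--     # Only the part of the line before the comment is searchable; a
--     # non-positive comment_start leaves nothing to search.
--     segment = line[:max(0, comment_start)]
--     return [(m.start(), m.end()) for m in _STRING_RE.finditer(segment)]
-- ===== Notes on version B (the rewrite author's own statement) =====
-- stated objective: idiomatic
-- what changed: Replaces A's hand-rolled per-character in_string/escape state machine by the standard idiom: slice off the pre-comment segment and collect the spans of re.finditer matches of the quoted-string pattern r'"(?:\\.|[^"\\])*"' (DOTALL); the scan runs in the C regex engine instead of a Python-level loop.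
import Mathlib
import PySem

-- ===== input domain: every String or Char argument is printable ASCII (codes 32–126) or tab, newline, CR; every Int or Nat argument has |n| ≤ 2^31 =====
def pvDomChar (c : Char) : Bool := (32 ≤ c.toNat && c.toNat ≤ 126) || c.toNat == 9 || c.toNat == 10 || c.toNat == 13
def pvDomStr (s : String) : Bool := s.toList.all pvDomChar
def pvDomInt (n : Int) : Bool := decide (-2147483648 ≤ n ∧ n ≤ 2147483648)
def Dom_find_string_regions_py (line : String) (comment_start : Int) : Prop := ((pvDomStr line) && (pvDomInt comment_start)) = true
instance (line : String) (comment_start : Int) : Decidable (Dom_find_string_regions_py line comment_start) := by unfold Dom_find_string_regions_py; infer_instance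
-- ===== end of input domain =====

-- B replaces A's manual in-string/escape state machine by a single regex pass
-- (re.finditer of a quoted-string pattern over the pre-comment slice); objective: idiomatic.

-- ===== PORT A =====
-- the while loop of A: state (regions, in_string, escape, start, i); fuel = number of
-- remaining iterations (i counts 0,1,…, loop runs while i < comment_start)
def pvALoop (cs : List Char) (regions : List (Int × Int)) (in_string escape : Bool)
    (start i : Int) : Nat → List (Int × Int)
  | 0 => regions
  | fuel + 1 =>
    match PySem.List.pyGet? cs i with
    | none => regions   -- IndexError in Python; excluded by Pre_ (never reached there)
    | some ch =>
      if escape then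
        pvALoop cs regions in_string false start (i + 1) fuel
      else if ch == '\\' && in_string then
        pvALoop cs regions in_string true start (i + 1) fuel
      else if ch == '"' then
        if in_string then
          pvALoop cs (regions ++ [(start, i + 1)]) false escape start (i + 1) fuel
        else
          pvALoop cs regions true escape i (i + 1) fuel
      else
        pvALoop cs regions in_string escape start (i + 1) fuel

def find_string_regions_py (line : String) (comment_start : Int) : List (Int × Int) :=
  pvALoop line.toList [] false false 0 0 comment_start.toNat

-- ===== PORT B =====
-- Hand port of re.finditer(r'"(?:\\.|[^"\\])*"', segment, re.DOTALL): the engine scans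
-- for an opening '"' (pvScanOut), then consumes the body, an escape pair '\\.' or any
-- non-quote non-backslash char, until the closing '"' (pvScanIn); an attempt that hits
-- the end of the segment unterminated yields no match (and, as the pattern can then
-- never close later either, finditer finds no further match: exact for this pattern).
mutual
def pvScanOut (l : List Char) (pos : Int) : List (Int × Int) :=
  match l with
  | [] => []
  | c :: rest =>
    if c == '"' then pvScanIn rest (pos + 1) pos
    else pvScanOut rest (pos + 1)

def pvScanIn (l : List Char) (pos strt : Int) : List (Int × Int) :=
  match l with
  | [] => []
  | c :: rest =>
    if c == '"' then (strt, pos + 1) :: pvScanOut rest (pos + 1)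
    else if c == '\\' then pvScanEsc rest (pos + 1) strt
    else pvScanIn rest (pos + 1) strt

-- the '\\.' escape-pair alternative: the backslash is consumed, one more char follows
def pvScanEsc (l : List Char) (pos strt : Int) : List (Int × Int) :=
  match l with
  | [] => []
  | _ :: rest => pvScanIn rest (pos + 1) strt
end

def find_string_regions_py_alt (line : String) (comment_start : Int) : List (Int × Int) :=
  pvScanOut (PySem.List.slice line.toList none (some (max 0 comment_start))) 0

-- ===== PRECONDITION & SPEC =====
-- A raises IndexError as soon as i reaches len(line) while i < comment_start,
-- i.e. exactly when comment_start > len(line); Pre_ excludes those inputs.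
def Pre_find_string_regions_py (line : String) (comment_start : Int) : Prop :=
  comment_start ≤ PySem.Str.len line
instance (line : String) (comment_start : Int) : Decidable (Pre_find_string_regions_py line comment_start) := by unfold Pre_find_string_regions_py; infer_instance

def pvWitness_find_string_regions_py : String × Int := ("x = \"a\" # c", 8)

def Spec_find_string_regions_py (line : String) (comment_start : Int) (out : List (Int × Int)) : Prop := out = find_string_regions_py_alt line comment_start
instance (line : String) (comment_start : Int) (out : List (Int × Int)) : Decidable (Spec_find_string_regions_py line comment_start out) := by unfold Spec_find_string_regions_py; infer_instance

-- ===== CLAIM (what is proved, stated in full; the proofs are below) =====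
def Claim_equal_find_string_regions_py : Prop := ∀ (line : String) (comment_start : Int), Dom_find_string_regions_py line comment_start → Pre_find_string_regions_py line comment_start → Spec_find_string_regions_py line comment_start (find_string_regions_py line comment_start)

-- ===== LEMMAS AND PROOFS =====

-- the segment A's loop still has to read when the index is n and fuel iterations remain
def pvSeg (cs : List Char) (n fuel : Nat) : List Char := (cs.drop n).take fuel

lemma pvSeg_succ (cs : List Char) (n fuel : Nat) (h : n < cs.length) :
    pvSeg cs n (fuel + 1) = cs[n] :: pvSeg cs (n + 1) fuel := by
  unfold pvSeg
  rw [List.drop_eq_getElem_cons h, List.take_succ_cons]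

-- core invariant: A's loop from index i with the three reachable (in_string, escape)
-- states equals the corresponding regex-scanner phase on the remaining segment
lemma pvLoop_eq_scan : ∀ (fuel : Nat) (cs : List Char) (i : Int) (regions : List (Int × Int)) (strt : Int),
    0 ≤ i → i.toNat + fuel ≤ cs.length →
    (pvALoop cs regions false false strt i fuel
        = regions ++ pvScanOut (pvSeg cs i.toNat fuel) i) ∧
    (pvALoop cs regions true false strt i fuel
        = regions ++ pvScanIn (pvSeg cs i.toNat fuel) i strt) ∧
    (pvALoop cs regions true true strt i fuel
        = regions ++ pvScanEsc (pvSeg cs i.toNat fuel) i strt) := by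
  intro fuel
  induction fuel with
  | zero =>
    intro cs i regions strt _ _
    simp [pvALoop, pvSeg, pvScanOut, pvScanIn, pvScanEsc]
  | succ fuel ih =>
    intro cs i regions strt h0 hlen
    have hn : i.toNat < cs.length := by omega
    have hget : PySem.List.pyGet? cs i = some cs[i.toNat] :=
      PySem.List.pyGet?_eq_some_getElem cs h0 (by omega)
    have hseg := pvSeg_succ cs i.toNat fuel hn
    have htn : (i + 1).toNat = i.toNat + 1 := by omega
    have hrec : (i + 1).toNat + fuel ≤ cs.length := by omega
    have h1 : (0 : Int) ≤ i + 1 := by omega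
    refine ⟨?_, ?_, ?_⟩
    · -- state (false, false) ~ pvScanOut
      simp only [pvALoop, hget, hseg, pvScanOut]
      by_cases hq : cs[i.toNat] = '"'
      · simp only [hq, Bool.false_eq_true, if_false, Bool.and_false, beq_self_eq_true, if_true]
        have := (ih cs (i + 1) regions i h1 hrec).2.1
        rw [htn] at this
        exact this
      · have hq' : (cs[i.toNat] == '"') = false := by simp [hq]
        simp only [hq', Bool.false_eq_true, if_false, Bool.and_false]
        have := (ih cs (i + 1) regions strt h1 hrec).1
        rw [htn] at this
        exact this
    · -- state (true, false) ~ pvScanIn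
      simp only [pvALoop, hget, hseg, pvScanIn]
      by_cases hq : cs[i.toNat] = '"'
      · simp only [hq, Bool.false_eq_true, if_false, Bool.and_true,
          (by decide : ('"' == '\\') = false), beq_self_eq_true, if_true]
        have := (ih cs (i + 1) (regions ++ [(strt, i + 1)]) strt h1 hrec).1
        rw [htn] at this
        rw [this, List.append_assoc]
        rfl
      · by_cases hbs : cs[i.toNat] = '\\'
        · have hq' : (cs[i.toNat] == '"') = false := by simp [hq]
          simp only [hbs, Bool.false_eq_true, if_false, Bool.and_true,
            beq_self_eq_true, if_true, (by decide : ('\\' == '"') = false)]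
          have := (ih cs (i + 1) regions strt h1 hrec).2.2
          rw [htn] at this
          exact this
        · have hq' : (cs[i.toNat] == '"') = false := by simp [hq]
          have hb' : (cs[i.toNat] == '\\') = false := by simp [hbs]
          simp only [hq', hb', Bool.false_eq_true, if_false, Bool.and_true]
          have := (ih cs (i + 1) regions strt h1 hrec).2.1
          rw [htn] at this
          exact this
    · -- state (true, true) ~ pvScanEsc
      simp only [pvALoop, hget, hseg, pvScanEsc, if_true]
      have := (ih cs (i + 1) regions strt h1 hrec).2.1
      rw [htn] at this
      exact this

-- ===== VERDICT (by name: the statement is the Claim_ definition above) =====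
theorem find_string_regions_py_spec : Claim_equal_find_string_regions_py := by
  intro line comment_start _ hpre
  unfold Spec_find_string_regions_py find_string_regions_py find_string_regions_py_alt
  have hlen : comment_start.toNat ≤ line.toList.length := by
    unfold Pre_find_string_regions_py PySem.Str.len at hpre
    omega
  have h := (pvLoop_eq_scan comment_start.toNat line.toList 0 [] 0 le_rfl (by omega)).1
  rw [h]
  have hslice : PySem.List.slice line.toList none (some (max 0 comment_start))
      = line.toList.take comment_start.toNat := by
    rw [PySem.List.slice_to _ (le_max_left 0 comment_start)]
    congr 1
    omega
  rw [hslice]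
  simp [pvSeg]
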